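-- pv_equiv track=rewrite | github.com/kwstx/contentagent | scripts/optimize_tweets.py | detect_opinionated
-- ===== SOURCE A (Python) =====
-- def detect_opinionated(text):
--     markers = [
--         "must",
--         "should",
--         "never",
--         "always",
--         "stop",
--         "broken",
--         "wrong",
--         "overrated",
--         "underrated",
--         "the real problem",
--         "everyone is wrong",
--         "nobody wants",
--         "we keep pretending",
--     ]
--     lower = text.lower()
--     return any(marker in lower for marker in markers)
-- ===== SOURCE B (Python) =====
-- _MARKERS = (
--     "must",
--     "should",
--     "never",
--     "always",
--     "stop",
--     "broken",
--     "wrong",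
--     "overrated",
--     "underrated",
--     "the real problem",
--     "everyone is wrong",
--     "nobody wants",
--     "we keep pretending",
-- )
--
--
-- def _build_trie(words):
--     root = {"accept": False, "edges": {}}
--     for w in words:
--         node = root
--         for ch in w:
--             node = node["edges"].setdefault(ch, {"accept": False, "edges": {}})
--         node["accept"] = True
--     return root
--
--
-- _TRIE = _build_trie(_MARKERS)
--
--
-- def detect_opinionated(text):
--     # Walk a prefix tree of the markers from each position of the lowered
--     # text, instead of running 13 independent substring scans.
--     lower = text.lower()
--     n = len(lower)
--     for i in range(n):
--         node = _TRIE
--         j = i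
--         while True:
--             if node["accept"]:
--                 return True
--             if j >= n or lower[j] not in node["edges"]:
--                 break
--             node = node["edges"][lower[j]]
--             j += 1
--     return False
-- ===== Notes on version B (the rewrite author's own statement) =====
-- stated objective: alternative
-- what changed: Replaced the 13 independent whole-text substring scans with a prefix tree (trie) of the markers built once, which is walked character-by-character from each position of the lowered text, so a single shared-prefix traversal replaces the per-marker scans.
import Mathlib
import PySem

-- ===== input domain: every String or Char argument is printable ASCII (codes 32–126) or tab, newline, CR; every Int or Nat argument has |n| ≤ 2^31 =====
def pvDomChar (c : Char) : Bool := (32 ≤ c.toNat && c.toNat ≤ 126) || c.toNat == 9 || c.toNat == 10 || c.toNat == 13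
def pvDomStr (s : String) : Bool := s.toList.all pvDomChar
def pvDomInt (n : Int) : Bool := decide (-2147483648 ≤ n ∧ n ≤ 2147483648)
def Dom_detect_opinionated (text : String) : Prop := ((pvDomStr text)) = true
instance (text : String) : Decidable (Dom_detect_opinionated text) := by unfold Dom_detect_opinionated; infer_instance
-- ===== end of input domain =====

-- B builds a trie (prefix tree) of the markers once and walks it from each
-- position of the lowered text, instead of 13 independent substring scans
-- (objective: alternative).


-- ===== PORT A =====
-- the literal marker list of A
def aMarkers : List String :=
  ["must", "should", "never", "always", "stop", "broken", "wrong", "overrated",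
   "underrated", "the real problem", "everyone is wrong", "nobody wants",
   "we keep pretending"]

def detect_opinionated (text : String) : Bool :=
  let lower := PySem.Str.lower text
  aMarkers.any (fun marker => PySem.Str.isIn marker lower)

-- ===== PORT B =====
-- the same marker list, as char lists (B works character-by-character)
def bMarkers : List (List Char) :=
  ["must".toList, "should".toList, "never".toList, "always".toList, "stop".toList,
   "broken".toList, "wrong".toList, "overrated".toList, "underrated".toList,
   "the real problem".toList, "everyone is wrong".toList, "nobody wants".toList,
   "we keep pretending".toList]

-- the trie: an accept flag plus labelled child edges (mutual pair, no nesting)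
mutual
inductive BTrie where
  | mk (accept : Bool) (edges : BEdges)
inductive BEdges where
  | nil
  | cons (c : Char) (t : BTrie) (e : BEdges)
end

-- edge lookup ('lower[j] in node["edges"]' / 'node["edges"][lower[j]]')
def bFind : BEdges → Char → Option BTrie
  | .nil, _ => none
  | .cons c' t e, c => if c' = c then some t else bFind e c

-- overwrite-or-append an edge (dict assignment / setdefault)
def bUpdate : BEdges → Char → BTrie → BEdges
  | .nil, c, t => .cons c t .nil
  | .cons c' t' e, c, t => if c' = c then .cons c' t e else .cons c' t' (bUpdate e c t)

-- the child reached by c, or a fresh empty node (setdefault's default)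
def bChild (e : BEdges) (c : Char) : BTrie :=
  (bFind e c).getD (.mk false .nil)

-- insert one word into the trie (inner loop of _build_trie)
def bInsert : BTrie → List Char → BTrie
  | .mk _ e, [] => .mk true e
  | .mk a e, c :: w => .mk a (bUpdate e c (bInsert (bChild e c) w))

-- the trie built once from all markers (_TRIE)
def bTrie : BTrie := bMarkers.foldl bInsert (.mk false .nil)

-- the inner 'while True' walk from one position: accept flag first, then follow
-- the edge labelled by the next character
def bAccepts : BTrie → List Char → Bool
  | .mk a _, [] => a
  | .mk a e, c :: cs =>
      a || (match bFind e c with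
            | some t => bAccepts t cs
            | none => false)

-- the outer loop over start positions i
def bScan : List Char → Bool
  | [] => false
  | c :: cs => bAccepts bTrie (c :: cs) || bScan cs

def detect_opinionated_alt (text : String) : Bool :=
  bScan (PySem.Str.lower text).toList

-- ===== PRECONDITION & SPEC =====
def Spec_detect_opinionated (text : String) (out : Bool) : Prop := out = detect_opinionated_alt text
instance (text : String) (out : Bool) : Decidable (Spec_detect_opinionated text out) := by unfold Spec_detect_opinionated; infer_instance

-- ===== CLAIM (what is proved, stated in full; the proofs are below) =====
def Claim_equal_detect_opinionated : Prop := ∀ (text : String), Dom_detect_opinionated text → Spec_detect_opinionated text (detect_opinionated text)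

-- ===== LEMMAS AND PROOFS =====

-- every marker is nonempty (so matching never succeeds at the end of the text)
theorem bMarkers_ne_nil : ∀ m ∈ bMarkers, m ≠ [] := by decide

theorem bFind_update_self : ∀ (e : BEdges) (c : Char) (t : BTrie),
    bFind (bUpdate e c t) c = some t
  | .nil, c, t => by simp [bUpdate, bFind]
  | .cons c' t' e, c, t => by
      by_cases h : c' = c <;> simp [bUpdate, bFind, h, bFind_update_self e c t]

theorem bFind_update_ne : ∀ (e : BEdges) (c d : Char) (t : BTrie), c ≠ d →
    bFind (bUpdate e c t) d = bFind e d
  | .nil, c, d, t, h => by simp [bUpdate, bFind, h]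
  | .cons c' t' e, c, d, t, h => by
      by_cases h' : c' = c
      · subst h'; simp [bUpdate, bFind, h]
      · simp [bUpdate, bFind, h', bFind_update_ne e c d t h]

theorem bAccepts_true (e : BEdges) (cs : List Char) :
    bAccepts (.mk true e) cs = true := by
  cases cs <;> simp [bAccepts]

theorem bAccepts_empty (cs : List Char) :
    bAccepts (.mk false .nil) cs = false := by
  cases cs <;> simp [bAccepts, bFind]

-- inserting a word adds exactly its prefix-matches to the accepted set
theorem bAccepts_insert (w : List Char) (t : BTrie) (cs : List Char) :
    bAccepts (bInsert t w) cs = (w.isPrefixOf cs || bAccepts t cs) := by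
  induction w generalizing t cs with
  | nil =>
      cases t with
      | mk a e => simp [bInsert, bAccepts_true, List.isPrefixOf]
  | cons c w ih =>
      cases t with
      | mk a e =>
        cases cs with
        | nil => simp [bInsert, bAccepts, List.isPrefixOf]
        | cons d cs' =>
            by_cases h : c = d
            · subst h
              simp only [bInsert, bAccepts, bFind_update_self, ih, List.isPrefixOf,
                beq_self_eq_true, Bool.true_and]
              cases hf : bFind e c with
              | some t0 =>
                  simp [bChild, hf, Bool.or_comm, Bool.or_assoc]
              | none =>
                  simp [bChild, hf, bAccepts_empty, Bool.or_comm]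
            · have hb : (c == d) = false := by simp [h]
              simp [bInsert, bAccepts, bFind_update_ne e c d _ h, List.isPrefixOf, hb]

theorem bAccepts_foldl (ws : List (List Char)) (t : BTrie) (cs : List Char) :
    bAccepts (List.foldl bInsert t ws) cs
      = (ws.any (fun w => w.isPrefixOf cs) || bAccepts t cs) := by
  induction ws generalizing t with
  | nil => simp
  | cons w ws ih =>
      simp [List.foldl, ih, bAccepts_insert, Bool.or_comm, Bool.or_assoc]

-- the trie walk accepts exactly when some marker is a prefix of the suffix
theorem bAccepts_trie (cs : List Char) :
    bAccepts bTrie cs = bMarkers.any (fun w => w.isPrefixOf cs) := by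
  simp [bTrie, bAccepts_foldl, bAccepts_empty]

-- B's scan finds exactly the infix occurrences of the (nonempty) markers
theorem bScan_iff (cs : List Char) :
    bScan cs = true ↔ ∃ m ∈ bMarkers, m <:+: cs := by
  induction cs with
  | nil =>
      simp only [bScan, List.infix_nil]
      constructor
      · intro h; exact absurd h (by decide)
      · rintro ⟨m, hm, rfl⟩; exact absurd rfl (bMarkers_ne_nil [] hm)
  | cons c cs ih =>
      simp only [bScan, Bool.or_eq_true, ih, bAccepts_trie, List.any_eq_true,
        List.isPrefixOf_iff_prefix]
      constructor
      · rintro (⟨m, hm, hp⟩ | ⟨m, hm, hi⟩)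
        · exact ⟨m, hm, hp.isInfix⟩
        · exact ⟨m, hm, hi.trans (List.suffix_cons c cs).isInfix⟩
      · rintro ⟨m, hm, hi⟩
        rcases (List.infix_cons_iff).1 hi with hp | hi'
        · exact Or.inl ⟨m, hm, hp⟩
        · exact Or.inr ⟨m, hm, hi'⟩

-- the two marker lists are the same strings
theorem markers_map : aMarkers.map String.toList = bMarkers := by decide

-- ===== VERDICT (by name: the statement is the Claim_ definition above) =====
theorem detect_opinionated_spec : Claim_equal_detect_opinionated := by
  intro text _
  unfold Spec_detect_opinionated detect_opinionated detect_opinionated_alt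
  rw [Bool.eq_iff_iff, bScan_iff, ← markers_map]
  simp only [List.any_eq_true, PySem.Str.isIn_iff_infix, List.mem_map]
  constructor
  · rintro ⟨m, hm, hi⟩; exact ⟨m.toList, ⟨m, hm, rfl⟩, hi⟩
  · rintro ⟨_, ⟨m, hm, rfl⟩, hi⟩; exact ⟨m, hm, hi⟩
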